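-- pv_equiv track=rewrite | github.com/GabriellaPeng/Tinamit | tinamit/Calib/ej/info_paráms.py | _soil_canal
-- ===== SOURCE A (Python) =====
-- def _soil_canal(all_poly_dt):
--     cls = ['Buchanan, Head', 'Buchanan, Middle', 'Buchanan, Tail', 'Farida, Head', 'Farida, Middle', 'Farida, Tail',
--            'Jhang, Middle', 'Jhang, Tail', 'Chuharkana, Tail']
--     s_p = {c: [ ] for c in cls}
--
--     for p in all_poly_dt:
--         if p in (17, 52, 185):
--             s_p[cls[0]].append(p)
--         elif p in (36, 85, 132):
--             s_p[cls[1]].append(p)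
--         elif p in (110, 125, 215):
--             s_p[cls[2]].append(p)
--         elif p in (7, 13, 76, 71):
--             s_p[cls[3]].append(p)
--         elif p in (25, 77, 123, 168,171):
--             s_p[cls[4]].append(p)
--         elif p in (54, 130, 172, 174, 178, 187, 191, 202, 205):
--             s_p[cls[5]].append(p)
--         elif p in (16, 22, 80, 94):
--             s_p[cls[6]].append(p)
--         elif p in (50, 121):
--             s_p[cls[7]].append(p)
--         elif p in (143, 164, 175, 203):
--             s_p[cls[8]].append(p)
--     return s_p
-- ===== SOURCE B (Python) =====
-- _IDS = [
--     ('Buchanan, Head', {17, 52, 185}),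
--     ('Buchanan, Middle', {36, 85, 132}),
--     ('Buchanan, Tail', {110, 125, 215}),
--     ('Farida, Head', {7, 13, 76, 71}),
--     ('Farida, Middle', {25, 77, 123, 168, 171}),
--     ('Farida, Tail', {54, 130, 172, 174, 178, 187, 191, 202, 205}),
--     ('Jhang, Middle', {16, 22, 80, 94}),
--     ('Jhang, Tail', {50, 121}),
--     ('Chuharkana, Tail', {143, 164, 175, 203}),
-- ]
--
--
-- def _soil_canal(all_poly_dt):
--     # one filtering pass per class: the id sets are pairwise disjoint, so
--     # per-class filtering reproduces the element-wise classification exactly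
--     return {c: [p for p in all_poly_dt if p in ids] for c, ids in _IDS}
-- ===== Notes on version B (the rewrite author's own statement) =====
-- stated objective: simpler
-- what changed: A classifies element-by-element through a nine-way if/elif cascade that appends into a mutable dict; B instead builds the result as a dict comprehension with one filtering pass per class (correct because the nine id sets are pairwise disjoint), so there is no per-element dispatch and no mutation.
import Mathlib
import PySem

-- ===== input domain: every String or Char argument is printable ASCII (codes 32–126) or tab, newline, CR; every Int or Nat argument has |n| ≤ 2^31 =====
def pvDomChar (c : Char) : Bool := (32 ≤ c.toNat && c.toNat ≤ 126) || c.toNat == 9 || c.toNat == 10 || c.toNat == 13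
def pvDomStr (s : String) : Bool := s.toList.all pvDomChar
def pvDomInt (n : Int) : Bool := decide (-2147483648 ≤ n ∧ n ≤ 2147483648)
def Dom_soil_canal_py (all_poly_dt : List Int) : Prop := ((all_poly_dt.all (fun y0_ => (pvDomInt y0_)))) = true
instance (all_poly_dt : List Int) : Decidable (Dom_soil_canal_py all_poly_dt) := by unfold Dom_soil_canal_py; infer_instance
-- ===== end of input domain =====

-- B replaces A's element-wise nine-way if/elif classification loop by a dict
-- comprehension making one filtering pass of the input per class (objective: simpler; same asymptotic cost).

-- ===== PORT A =====
-- the cls list of A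
def scCls : List String :=
  ["Buchanan, Head", "Buchanan, Middle", "Buchanan, Tail", "Farida, Head", "Farida, Middle",
   "Farida, Tail", "Jhang, Middle", "Jhang, Tail", "Chuharkana, Tail"]

-- loop body of A: the if/elif cascade (s_p[cls[i]].append(p) = modify with append)
def scStepA (d : PySem.Dict String (List Int)) (p : Int) : PySem.Dict String (List Int) :=
  if p == 17 || p == 52 || p == 185 then d.modify ("Buchanan, Head") [] (· ++ [p])
    else if p == 36 || p == 85 || p == 132 then d.modify ("Buchanan, Middle") [] (· ++ [p])
    else if p == 110 || p == 125 || p == 215 then d.modify ("Buchanan, Tail") [] (· ++ [p])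
    else if p == 7 || p == 13 || p == 76 || p == 71 then d.modify ("Farida, Head") [] (· ++ [p])
    else if p == 25 || p == 77 || p == 123 || p == 168 || p == 171 then d.modify ("Farida, Middle") [] (· ++ [p])
    else if p == 54 || p == 130 || p == 172 || p == 174 || p == 178 || p == 187 || p == 191 || p == 202 || p == 205 then d.modify ("Farida, Tail") [] (· ++ [p])
    else if p == 16 || p == 22 || p == 80 || p == 94 then d.modify ("Jhang, Middle") [] (· ++ [p])
    else if p == 50 || p == 121 then d.modify ("Jhang, Tail") [] (· ++ [p])
    else if p == 143 || p == 164 || p == 175 || p == 203 then d.modify ("Chuharkana, Tail") [] (· ++ [p])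
  else d

def soil_canal_py (all_poly_dt : List Int) : List (String × List Int) :=
  let s_p := scCls.foldl (fun d c => d.insert c ([] : List Int)) PySem.Dict.empty
  (all_poly_dt.foldl scStepA s_p).items

-- ===== PORT B =====
-- B's _IDS table: the nine (class, id-set) pairs (each Python set as its distinct elements)
def scIds : List (String × List Int) :=
  [("Buchanan, Head", [17, 52, 185]),
   ("Buchanan, Middle", [36, 85, 132]),
   ("Buchanan, Tail", [110, 125, 215]),
   ("Farida, Head", [7, 13, 76, 71]),
   ("Farida, Middle", [25, 77, 123, 168, 171]),
   ("Farida, Tail", [54, 130, 172, 174, 178, 187, 191, 202, 205]),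
   ("Jhang, Middle", [16, 22, 80, 94]),
   ("Jhang, Tail", [50, 121]),
   ("Chuharkana, Tail", [143, 164, 175, 203])]

-- B's dict comprehension: one filtering pass of the input per class
def soil_canal_py_alt (all_poly_dt : List Int) : List (String × List Int) :=
  (PySem.Dict.mk (scIds.map (fun ci => (ci.1, all_poly_dt.filter (fun p => ci.2.contains p))))).items

-- ===== PRECONDITION & SPEC =====
def Spec_soil_canal_py (all_poly_dt : List Int) (out : List (String × List Int)) : Prop := out = soil_canal_py_alt all_poly_dt
instance (all_poly_dt : List Int) (out : List (String × List Int)) : Decidable (Spec_soil_canal_py all_poly_dt out) := by unfold Spec_soil_canal_py; infer_instance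

-- ===== CLAIM (what is proved, stated in full; the proofs are below) =====
def Claim_equal_soil_canal_py : Prop := ∀ (all_poly_dt : List Int), Dom_soil_canal_py all_poly_dt → Spec_soil_canal_py all_poly_dt (soil_canal_py all_poly_dt)

-- ===== LEMMAS AND PROOFS =====
-- invariant of A's loop: starting from the nine-key dict with arbitrary value lists,
-- folding the cascade over l appends to each class exactly the elements of l in its id set
lemma scFold_inv (l : List Int) : ∀ v0 v1 v2 v3 v4 v5 v6 v7 v8 : List Int,
    l.foldl scStepA (PySem.Dict.mk [("Buchanan, Head", v0), ("Buchanan, Middle", v1), ("Buchanan, Tail", v2), ("Farida, Head", v3), ("Farida, Middle", v4), ("Farida, Tail", v5), ("Jhang, Middle", v6), ("Jhang, Tail", v7), ("Chuharkana, Tail", v8)]) =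
    PySem.Dict.mk
    [("Buchanan, Head", v0 ++ l.filter (fun p => ([17, 52, 185] : List Int).contains p)),
     ("Buchanan, Middle", v1 ++ l.filter (fun p => ([36, 85, 132] : List Int).contains p)),
     ("Buchanan, Tail", v2 ++ l.filter (fun p => ([110, 125, 215] : List Int).contains p)),
     ("Farida, Head", v3 ++ l.filter (fun p => ([7, 13, 76, 71] : List Int).contains p)),
     ("Farida, Middle", v4 ++ l.filter (fun p => ([25, 77, 123, 168, 171] : List Int).contains p)),
     ("Farida, Tail", v5 ++ l.filter (fun p => ([54, 130, 172, 174, 178, 187, 191, 202, 205] : List Int).contains p)),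
     ("Jhang, Middle", v6 ++ l.filter (fun p => ([16, 22, 80, 94] : List Int).contains p)),
     ("Jhang, Tail", v7 ++ l.filter (fun p => ([50, 121] : List Int).contains p)),
     ("Chuharkana, Tail", v8 ++ l.filter (fun p => ([143, 164, 175, 203] : List Int).contains p))] := by
  induction l with
  | nil => intro v0 v1 v2 v3 v4 v5 v6 v7 v8; simp
  | cons p t ih =>
    intro v0 v1 v2 v3 v4 v5 v6 v7 v8
    show t.foldl scStepA (scStepA _ p) = _
    by_cases h0 : p = 17
    · subst h0
      simp [scStepA, PySem.Dict.modify, PySem.Dict.insert, PySem.Dict.getD, PySem.Dict.get?, PySem.Dict.contains, ih]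
    by_cases h1 : p = 52
    · subst h1
      simp [scStepA, PySem.Dict.modify, PySem.Dict.insert, PySem.Dict.getD, PySem.Dict.get?, PySem.Dict.contains, ih]
    by_cases h2 : p = 185
    · subst h2
      simp [scStepA, PySem.Dict.modify, PySem.Dict.insert, PySem.Dict.getD, PySem.Dict.get?, PySem.Dict.contains, ih]
    by_cases h3 : p = 36
    · subst h3
      simp [scStepA, PySem.Dict.modify, PySem.Dict.insert, PySem.Dict.getD, PySem.Dict.get?, PySem.Dict.contains, ih]
    by_cases h4 : p = 85
    · subst h4
      simp [scStepA, PySem.Dict.modify, PySem.Dict.insert, PySem.Dict.getD, PySem.Dict.get?, PySem.Dict.contains, ih]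
    by_cases h5 : p = 132
    · subst h5
      simp [scStepA, PySem.Dict.modify, PySem.Dict.insert, PySem.Dict.getD, PySem.Dict.get?, PySem.Dict.contains, ih]
    by_cases h6 : p = 110
    · subst h6
      simp [scStepA, PySem.Dict.modify, PySem.Dict.insert, PySem.Dict.getD, PySem.Dict.get?, PySem.Dict.contains, ih]
    by_cases h7 : p = 125
    · subst h7
      simp [scStepA, PySem.Dict.modify, PySem.Dict.insert, PySem.Dict.getD, PySem.Dict.get?, PySem.Dict.contains, ih]
    by_cases h8 : p = 215
    · subst h8
      simp [scStepA, PySem.Dict.modify, PySem.Dict.insert, PySem.Dict.getD, PySem.Dict.get?, PySem.Dict.contains, ih]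
    by_cases h9 : p = 7
    · subst h9
      simp [scStepA, PySem.Dict.modify, PySem.Dict.insert, PySem.Dict.getD, PySem.Dict.get?, PySem.Dict.contains, ih]
    by_cases h10 : p = 13
    · subst h10
      simp [scStepA, PySem.Dict.modify, PySem.Dict.insert, PySem.Dict.getD, PySem.Dict.get?, PySem.Dict.contains, ih]
    by_cases h11 : p = 76
    · subst h11
      simp [scStepA, PySem.Dict.modify, PySem.Dict.insert, PySem.Dict.getD, PySem.Dict.get?, PySem.Dict.contains, ih]
    by_cases h12 : p = 71
    · subst h12
      simp [scStepA, PySem.Dict.modify, PySem.Dict.insert, PySem.Dict.getD, PySem.Dict.get?, PySem.Dict.contains, ih]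
    by_cases h13 : p = 25
    · subst h13
      simp [scStepA, PySem.Dict.modify, PySem.Dict.insert, PySem.Dict.getD, PySem.Dict.get?, PySem.Dict.contains, ih]
    by_cases h14 : p = 77
    · subst h14
      simp [scStepA, PySem.Dict.modify, PySem.Dict.insert, PySem.Dict.getD, PySem.Dict.get?, PySem.Dict.contains, ih]
    by_cases h15 : p = 123
    · subst h15
      simp [scStepA, PySem.Dict.modify, PySem.Dict.insert, PySem.Dict.getD, PySem.Dict.get?, PySem.Dict.contains, ih]
    by_cases h16 : p = 168
    · subst h16
      simp [scStepA, PySem.Dict.modify, PySem.Dict.insert, PySem.Dict.getD, PySem.Dict.get?, PySem.Dict.contains, ih]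
    by_cases h17 : p = 171
    · subst h17
      simp [scStepA, PySem.Dict.modify, PySem.Dict.insert, PySem.Dict.getD, PySem.Dict.get?, PySem.Dict.contains, ih]
    by_cases h18 : p = 54
    · subst h18
      simp [scStepA, PySem.Dict.modify, PySem.Dict.insert, PySem.Dict.getD, PySem.Dict.get?, PySem.Dict.contains, ih]
    by_cases h19 : p = 130
    · subst h19
      simp [scStepA, PySem.Dict.modify, PySem.Dict.insert, PySem.Dict.getD, PySem.Dict.get?, PySem.Dict.contains, ih]
    by_cases h20 : p = 172
    · subst h20
      simp [scStepA, PySem.Dict.modify, PySem.Dict.insert, PySem.Dict.getD, PySem.Dict.get?, PySem.Dict.contains, ih]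
    by_cases h21 : p = 174
    · subst h21
      simp [scStepA, PySem.Dict.modify, PySem.Dict.insert, PySem.Dict.getD, PySem.Dict.get?, PySem.Dict.contains, ih]
    by_cases h22 : p = 178
    · subst h22
      simp [scStepA, PySem.Dict.modify, PySem.Dict.insert, PySem.Dict.getD, PySem.Dict.get?, PySem.Dict.contains, ih]
    by_cases h23 : p = 187
    · subst h23
      simp [scStepA, PySem.Dict.modify, PySem.Dict.insert, PySem.Dict.getD, PySem.Dict.get?, PySem.Dict.contains, ih]
    by_cases h24 : p = 191
    · subst h24
      simp [scStepA, PySem.Dict.modify, PySem.Dict.insert, PySem.Dict.getD, PySem.Dict.get?, PySem.Dict.contains, ih]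
    by_cases h25 : p = 202
    · subst h25
      simp [scStepA, PySem.Dict.modify, PySem.Dict.insert, PySem.Dict.getD, PySem.Dict.get?, PySem.Dict.contains, ih]
    by_cases h26 : p = 205
    · subst h26
      simp [scStepA, PySem.Dict.modify, PySem.Dict.insert, PySem.Dict.getD, PySem.Dict.get?, PySem.Dict.contains, ih]
    by_cases h27 : p = 16
    · subst h27
      simp [scStepA, PySem.Dict.modify, PySem.Dict.insert, PySem.Dict.getD, PySem.Dict.get?, PySem.Dict.contains, ih]
    by_cases h28 : p = 22
    · subst h28
      simp [scStepA, PySem.Dict.modify, PySem.Dict.insert, PySem.Dict.getD, PySem.Dict.get?, PySem.Dict.contains, ih]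
    by_cases h29 : p = 80
    · subst h29
      simp [scStepA, PySem.Dict.modify, PySem.Dict.insert, PySem.Dict.getD, PySem.Dict.get?, PySem.Dict.contains, ih]
    by_cases h30 : p = 94
    · subst h30
      simp [scStepA, PySem.Dict.modify, PySem.Dict.insert, PySem.Dict.getD, PySem.Dict.get?, PySem.Dict.contains, ih]
    by_cases h31 : p = 50
    · subst h31
      simp [scStepA, PySem.Dict.modify, PySem.Dict.insert, PySem.Dict.getD, PySem.Dict.get?, PySem.Dict.contains, ih]
    by_cases h32 : p = 121
    · subst h32
      simp [scStepA, PySem.Dict.modify, PySem.Dict.insert, PySem.Dict.getD, PySem.Dict.get?, PySem.Dict.contains, ih]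
    by_cases h33 : p = 143
    · subst h33
      simp [scStepA, PySem.Dict.modify, PySem.Dict.insert, PySem.Dict.getD, PySem.Dict.get?, PySem.Dict.contains, ih]
    by_cases h34 : p = 164
    · subst h34
      simp [scStepA, PySem.Dict.modify, PySem.Dict.insert, PySem.Dict.getD, PySem.Dict.get?, PySem.Dict.contains, ih]
    by_cases h35 : p = 175
    · subst h35
      simp [scStepA, PySem.Dict.modify, PySem.Dict.insert, PySem.Dict.getD, PySem.Dict.get?, PySem.Dict.contains, ih]
    by_cases h36 : p = 203
    · subst h36
      simp [scStepA, PySem.Dict.modify, PySem.Dict.insert, PySem.Dict.getD, PySem.Dict.get?, PySem.Dict.contains, ih]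
    simp [scStepA, h0, h1, h2, h3, h4, h5, h6, h7, h8, h9, h10, h11, h12, h13, h14, h15, h16, h17, h18, h19, h20, h21, h22, h23, h24, h25, h26, h27, h28, h29, h30, h31, h32, h33, h34, h35, h36, ih]

-- ===== VERDICT (by name: the statement is the Claim_ definition above) =====
theorem soil_canal_py_spec : Claim_equal_soil_canal_py := by
  intro l _
  unfold Spec_soil_canal_py soil_canal_py soil_canal_py_alt
  show (List.foldl scStepA (PySem.Dict.mk
        [("Buchanan, Head", ([] : List Int)), ("Buchanan, Middle", []), ("Buchanan, Tail", []),
         ("Farida, Head", []), ("Farida, Middle", []), ("Farida, Tail", []),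
         ("Jhang, Middle", []), ("Jhang, Tail", []), ("Chuharkana, Tail", [])]) l).items = _
  rw [scFold_inv]
  simp [scIds]
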